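-- pv_equiv track=rewrite | github.com/SEIR-0508/u4_python_challenges | Main.py | number_of_online
-- ===== SOURCE A (Python) =====
-- def number_of_online(statuses):
--
--     online_count = 0
--     offline_count = 0
--     people_online = ''
--     people_offline = ''
--     for key, value in statuses.items():
--         if value == 'online':
--             online_count += 1
--             people_online += f'{key}, '
--         elif value == 'offline':
--             offline_count += 1
--             people_offline += f'{key}, '
--     return f'There are {online_count} people online. They are {people_online}. There are {offline_count} people offline. They are {people_offline}.'
-- ===== SOURCE B (Python) =====
-- def number_of_online(statuses):
--     online = [k for k, v in statuses.items() if v == 'online']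
--     offline = [k for k, v in statuses.items() if v == 'offline']
--     return (f"There are {len(online)} people online. They are "
--             + ''.join(f'{k}, ' for k in online)
--             + f". There are {len(offline)} people offline. They are "
--             + ''.join(f'{k}, ' for k in offline)
--             + ".")
-- ===== Notes on version B (the rewrite author's own statement) =====
-- stated objective: simpler
-- what changed: Replaced the single interleaved loop with four accumulators by two filter comprehensions; counts come from len() and the people-strings from ''.join of per-key fragments.
import Mathlib
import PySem

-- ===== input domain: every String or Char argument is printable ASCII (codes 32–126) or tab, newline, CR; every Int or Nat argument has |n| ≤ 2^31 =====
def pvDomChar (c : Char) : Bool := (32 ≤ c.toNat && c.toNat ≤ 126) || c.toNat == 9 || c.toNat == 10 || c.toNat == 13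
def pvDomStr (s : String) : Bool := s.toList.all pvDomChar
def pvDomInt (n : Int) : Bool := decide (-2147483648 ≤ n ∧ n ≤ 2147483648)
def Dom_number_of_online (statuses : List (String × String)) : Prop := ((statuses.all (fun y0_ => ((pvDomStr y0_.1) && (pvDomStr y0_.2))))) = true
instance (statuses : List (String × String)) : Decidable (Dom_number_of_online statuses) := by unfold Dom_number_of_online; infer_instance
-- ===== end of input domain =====

-- B replaces A's single loop with four accumulators by two filter passes plus len and ''.join; objective: simpler.

-- ===== PORT A =====
-- one interleaved pass over the dict items, maintaining two counters and two strings
def number_of_online (statuses : List (String × String)) : String :=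
  let s := ((PySem.Dict.ofList statuses).items).foldl
    (fun (st : Int × Int × String × String) kv =>
      if kv.2 == "online" then (st.1 + 1, st.2.1, st.2.2.1 ++ kv.1 ++ ", ", st.2.2.2)
      else if kv.2 == "offline" then (st.1, st.2.1 + 1, st.2.2.1, st.2.2.2 ++ kv.1 ++ ", ")
      else st)
    (0, 0, "", "")
  "There are " ++ PySem.Int.toStr s.1 ++ " people online. They are " ++ s.2.2.1 ++
    ". There are " ++ PySem.Int.toStr s.2.1 ++ " people offline. They are " ++ s.2.2.2 ++ "."

-- ===== PORT B =====
-- two filter comprehensions; counts by length, people-strings by ''.join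
def number_of_online_alt (statuses : List (String × String)) : String :=
  let items := (PySem.Dict.ofList statuses).items
  let online := (items.filter (fun kv => kv.2 == "online")).map Prod.fst
  let offline := (items.filter (fun kv => kv.2 == "offline")).map Prod.fst
  "There are " ++ PySem.Int.toStr (online.length : Int) ++ " people online. They are " ++
    PySem.Str.join "" (online.map (fun k => k ++ ", ")) ++
    ". There are " ++ PySem.Int.toStr (offline.length : Int) ++ " people offline. They are " ++
    PySem.Str.join "" (offline.map (fun k => k ++ ", ")) ++ "."

-- ===== PRECONDITION & SPEC =====
def Spec_number_of_online (statuses : List (String × String)) (out : String) : Prop := out = number_of_online_alt statuses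
instance (statuses : List (String × String)) (out : String) : Decidable (Spec_number_of_online statuses out) := by unfold Spec_number_of_online; infer_instance

-- ===== CLAIM (what is proved, stated in full; the proofs are below) =====
def Claim_equal_number_of_online : Prop := ∀ (statuses : List (String × String)), Dom_number_of_online statuses → Spec_number_of_online statuses (number_of_online statuses)

-- ===== LEMMAS AND PROOFS =====

lemma join_empty_cons (s : String) (l : List String) : PySem.Str.join "" (s :: l) = s ++ PySem.Str.join "" l := by
  have h : (PySem.Str.join "" (s :: l)).toList = (s ++ PySem.Str.join "" l).toList := by
    cases l <;> simp [PySem.Str.toList_join, PySem.Chars.join, List.intercalate]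
  exact String.toList_inj.mp h

-- invariant of A's loop: the four accumulators, in terms of B's two filtered lists
lemma noo_loop (l : List (String × String)) (a b : Int) (c d : String) :
    l.foldl
      (fun (st : Int × Int × String × String) kv =>
        if kv.2 == "online" then (st.1 + 1, st.2.1, st.2.2.1 ++ kv.1 ++ ", ", st.2.2.2)
        else if kv.2 == "offline" then (st.1, st.2.1 + 1, st.2.2.1, st.2.2.2 ++ kv.1 ++ ", ")
        else st)
      (a, b, c, d)
    = (a + ((l.filter (fun kv => kv.2 == "online")).length : Int),
       b + ((l.filter (fun kv => kv.2 == "offline")).length : Int),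
       c ++ PySem.Str.join "" (((l.filter (fun kv => kv.2 == "online")).map Prod.fst).map (fun k => k ++ ", ")),
       d ++ PySem.Str.join "" (((l.filter (fun kv => kv.2 == "offline")).map Prod.fst).map (fun k => k ++ ", "))) := by
  induction l generalizing a b c d with
  | nil => simp [PySem.Str.join, PySem.Chars.join, List.intercalate]
  | cons kv t ih =>
    rw [List.foldl_cons]
    by_cases hon : kv.2 = "online"
    · rw [if_pos (by simp [hon]), ih]
      simp only [List.filter_cons, hon, Prod.mk.injEq]
      refine ⟨by simp; omega, by simp, by simp [join_empty_cons, String.append_assoc], rfl⟩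
    · by_cases hoff : kv.2 = "offline"
      · rw [if_neg (by simp [hon]), if_pos (by simp [hoff]), ih]
        simp only [List.filter_cons, hoff, Prod.mk.injEq]
        refine ⟨by simp, by simp; omega, by simp, by simp [join_empty_cons, String.append_assoc]⟩
      · rw [if_neg (by simp [hon]), if_neg (by simp [hoff]), ih]
        simp [hon, hoff]

-- ===== VERDICT (by name: the statement is the Claim_ definition above) =====
theorem number_of_online_spec : Claim_equal_number_of_online := by
  intro statuses _
  unfold Spec_number_of_online number_of_online number_of_online_alt
  simp only [noo_loop]
  simp
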